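-- pv_equiv track=rewrite | github.com/ArthurG0/2048-Defeater | search.py | minPlayerMoves
-- ===== SOURCE A (Python) =====
-- def minPlayerMoves(grid, missesWanted = 0):
--     missed = 0
--     for i in [3,2,1,0,  4,5,6,7,  8,9,10,11,   12,13,14,15]:
--         if(grid[i//4][i%4] == 0):
--             if(missesWanted == missed):
--                 grid[i//4][i%4] = 2
--                 return 1
--             else:
--                 missed+=1
--
--     return 0
-- ===== SOURCE B (Python) =====
-- def minPlayerMoves(grid, missesWanted=0):
--     # The return value does not depend on WHICH empty cell the scan reaches:
--     # it is 1 exactly when missesWanted is a valid rank among the empty cells,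
--     # i.e. 0 <= missesWanted < (number of zeros in the 4x4 grid).
--     # Computed as a single count; A's in-place placement of the 2 is not reproduced
--     # (the stated equivalence is about the return value only).
--     zeros = sum(1 for r in range(4) for c in range(4) if grid[r][c] == 0)
--     return 1 if 0 <= missesWanted < zeros else 0
-- ===== Notes on version B (the rewrite author's own statement) =====
-- stated objective: alternative
-- what changed: B drops the nth-empty-cell selection scan entirely: the return value is characterized in closed form as [0 <= missesWanted < number of zeros in the 4x4 grid], computed by a single order-independent count; A's in-place placement of the 2 is not reproduced (equivalence is about the return value).
-- outside the precondition, e.g. on minPlayerMoves([[0, 0, 0, 0]], 0): A returns 1, B raises IndexError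
import Mathlib
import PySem

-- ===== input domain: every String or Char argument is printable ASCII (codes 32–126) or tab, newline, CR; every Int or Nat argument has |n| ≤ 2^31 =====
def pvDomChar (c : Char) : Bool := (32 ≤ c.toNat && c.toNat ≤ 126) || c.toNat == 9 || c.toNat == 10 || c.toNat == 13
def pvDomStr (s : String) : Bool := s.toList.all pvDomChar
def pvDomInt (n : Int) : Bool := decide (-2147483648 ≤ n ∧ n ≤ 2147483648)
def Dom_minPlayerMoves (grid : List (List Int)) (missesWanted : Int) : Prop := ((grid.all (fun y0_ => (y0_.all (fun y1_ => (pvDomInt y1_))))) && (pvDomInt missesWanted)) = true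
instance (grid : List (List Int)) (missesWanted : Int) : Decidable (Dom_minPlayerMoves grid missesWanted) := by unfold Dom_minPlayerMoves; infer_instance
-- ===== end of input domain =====

-- B replaces A's nth-empty-cell selection scan by a closed-form criterion: the return
-- value is 1 exactly when 0 ≤ missesWanted < (number of zeros in the 4×4 grid), computed
-- as a single count (objective: alternative). A also mutates `grid` in place; B does not —
-- the equivalence proved here is about the RETURN value only.

-- ===== PORT A =====
-- grid[r][c] for the in-range indices Pre_ guarantees (getD defaults are never hit on Pre_)
def pvCell (grid : List (List Int)) (r c : Int) : Int :=
  (PySem.List.pyGet? ((PySem.List.pyGet? grid r).getD []) c).getD 0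

-- A's for-loop with its `missed` counter and early returns
def pvLoopA (grid : List (List Int)) (missesWanted : Int) : List Int → Int → Int
  | [], _ => 0
  | i :: rest, missed =>
    if pvCell grid (PySem.Int.floordiv i 4) (PySem.Int.mod i 4) == 0 then
      if missesWanted == missed then 1 else pvLoopA grid missesWanted rest (missed + 1)
    else pvLoopA grid missesWanted rest missed

def minPlayerMoves (grid : List (List Int)) (missesWanted : Int) : Int :=
  pvLoopA grid missesWanted [3,2,1,0, 4,5,6,7, 8,9,10,11, 12,13,14,15] 0

-- ===== PORT B =====
-- the generator-sum: 1 for r in range(4) for c in range(4) if grid[r][c] == 0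
def minPlayerMoves_alt (grid : List (List Int)) (missesWanted : Int) : Int :=
  let zeros : Int :=
    ((PySem.List.pyRange 0 4 1).flatMap (fun r =>
      ((PySem.List.pyRange 0 4 1).filter (fun c => pvCell grid r c == 0)).map
        (fun _ => (1 : Int)))).sum
  if 0 ≤ missesWanted ∧ missesWanted < zeros then 1 else 0

-- ===== PRECONDITION & SPEC =====
-- Pre_ requires a 4×4 grid (four rows of at least four entries): outside this both
-- programs can raise IndexError, except when an early return in A's scan happens to
-- precede the first out-of-range access — there B itself raises, so those inputs are excluded.
def Pre_minPlayerMoves (grid : List (List Int)) (missesWanted : Int) : Prop :=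
  4 ≤ grid.length ∧ ∀ row ∈ grid.take 4, 4 ≤ row.length
instance (grid : List (List Int)) (missesWanted : Int) : Decidable (Pre_minPlayerMoves grid missesWanted) := by
  unfold Pre_minPlayerMoves; infer_instance

def pvWitness_minPlayerMoves : List (List Int) × Int :=
  ([[0,2,0,4],[2,2,0,0],[0,0,0,0],[8,0,2,0]], 2)

def Spec_minPlayerMoves (grid : List (List Int)) (missesWanted : Int) (out : Int) : Prop := out = minPlayerMoves_alt grid missesWanted
instance (grid : List (List Int)) (missesWanted : Int) (out : Int) : Decidable (Spec_minPlayerMoves grid missesWanted out) := by unfold Spec_minPlayerMoves; infer_instance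

-- ===== CLAIM =====
def Claim_equal_minPlayerMoves : Prop := ∀ (grid : List (List Int)) (missesWanted : Int), Dom_minPlayerMoves grid missesWanted → Pre_minPlayerMoves grid missesWanted → Spec_minPlayerMoves grid missesWanted (minPlayerMoves grid missesWanted)

-- ===== LEMMAS AND PROOFS =====

-- A's scan over any index list l with counter `missed` returns 1 exactly when missesWanted
-- falls in [missed, missed + number of zero cells in l).
theorem pvLoopA_eq (grid : List (List Int)) (mw : Int) (l : List Int) (m : Int) :
    pvLoopA grid mw l m =
      (if m ≤ mw ∧ mw < m + ((l.filter
          (fun i => pvCell grid (PySem.Int.floordiv i 4) (PySem.Int.mod i 4) == 0)).length : Int)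
        then 1 else 0) := by
  induction l generalizing m with
  | nil => simp only [pvLoopA, List.filter_nil, List.length_nil]; norm_num
  | cons i rest ih =>
    by_cases h : pvCell grid (PySem.Int.floordiv i 4) (PySem.Int.mod i 4) == 0
    · by_cases hm : mw = m
      · have hb : (mw == m) = true := by simp [hm]
        simp only [pvLoopA, h, hb, if_true]
        rw [if_pos]
        simp only [List.filter_cons, h, if_true, List.length_cons]
        push_cast
        omega
      · have hb : (mw == m) = false := by simp [hm]
        simp only [pvLoopA, h, hb, if_true, Bool.false_eq_true, if_false]
        rw [ih (m + 1)]
        simp only [List.filter_cons, h, if_true, List.length_cons]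
        push_cast
        split_ifs <;> omega
    · simp only [pvLoopA, h, Bool.false_eq_true, if_false]
      rw [ih m]
      simp only [List.filter_cons, h, Bool.false_eq_true, if_false]

-- filter-length as a sum of 0/1 indicators (over Int)
theorem pvFilterLen_eq_sum (p : Int → Bool) (l : List Int) :
    ((l.filter p).length : Int) = (l.map (fun x => if p x then (1 : Int) else 0)).sum := by
  induction l with
  | nil => simp
  | cons x rest ih =>
    by_cases h : p x <;> simp [h, ih] <;> ring

-- map-to-constant-1 sums to the length
theorem pvSumConstOne (l : List Int) : ((l.map (fun _ => (1 : Int))).sum) = (l.length : Int) := by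
  induction l with
  | nil => simp
  | cons x rest ih => simp; ring

-- the two counts agree: A's filter over the flat order vs B's row-by-row generator sum
theorem pvCounts_eq (grid : List (List Int)) :
    (([3,2,1,0, 4,5,6,7, 8,9,10,11, 12,13,14,15].filter
        (fun i => pvCell grid (PySem.Int.floordiv i 4) (PySem.Int.mod i 4) == 0)).length : Int) =
    ((PySem.List.pyRange 0 4 1).flatMap (fun r =>
      ((PySem.List.pyRange 0 4 1).filter (fun c => pvCell grid r c == 0)).map
        (fun _ => (1 : Int)))).sum := by
  have hr : PySem.List.pyRange 0 4 1 = [0, 1, 2, 3] := by decide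
  rw [pvFilterLen_eq_sum, hr]
  simp only [List.flatMap_cons, List.flatMap_nil, List.append_nil, List.sum_append,
    pvSumConstOne, pvFilterLen_eq_sum]
  simp only [List.map_cons, List.map_nil, List.sum_cons, List.sum_nil,
    show PySem.Int.floordiv 3 4 = 0 from by decide,
    show PySem.Int.mod 3 4 = 3 from by decide,
    show PySem.Int.floordiv 2 4 = 0 from by decide,
    show PySem.Int.mod 2 4 = 2 from by decide,
    show PySem.Int.floordiv 1 4 = 0 from by decide,
    show PySem.Int.mod 1 4 = 1 from by decide,
    show PySem.Int.floordiv 0 4 = 0 from by decide,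
    show PySem.Int.mod 0 4 = 0 from by decide,
    show PySem.Int.floordiv 4 4 = 1 from by decide,
    show PySem.Int.mod 4 4 = 0 from by decide,
    show PySem.Int.floordiv 5 4 = 1 from by decide,
    show PySem.Int.mod 5 4 = 1 from by decide,
    show PySem.Int.floordiv 6 4 = 1 from by decide,
    show PySem.Int.mod 6 4 = 2 from by decide,
    show PySem.Int.floordiv 7 4 = 1 from by decide,
    show PySem.Int.mod 7 4 = 3 from by decide,
    show PySem.Int.floordiv 8 4 = 2 from by decide,
    show PySem.Int.mod 8 4 = 0 from by decide,
    show PySem.Int.floordiv 9 4 = 2 from by decide,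
    show PySem.Int.mod 9 4 = 1 from by decide,
    show PySem.Int.floordiv 10 4 = 2 from by decide,
    show PySem.Int.mod 10 4 = 2 from by decide,
    show PySem.Int.floordiv 11 4 = 2 from by decide,
    show PySem.Int.mod 11 4 = 3 from by decide,
    show PySem.Int.floordiv 12 4 = 3 from by decide,
    show PySem.Int.mod 12 4 = 0 from by decide,
    show PySem.Int.floordiv 13 4 = 3 from by decide,
    show PySem.Int.mod 13 4 = 1 from by decide,
    show PySem.Int.floordiv 14 4 = 3 from by decide,
    show PySem.Int.mod 14 4 = 2 from by decide,
    show PySem.Int.floordiv 15 4 = 3 from by decide,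
    show PySem.Int.mod 15 4 = 3 from by decide]
  ring

theorem minPlayerMoves_eq_alt (grid : List (List Int)) (mw : Int) :
    minPlayerMoves grid mw = minPlayerMoves_alt grid mw := by
  unfold minPlayerMoves minPlayerMoves_alt
  rw [pvLoopA_eq, pvCounts_eq]
  norm_num

-- ===== VERDICT =====
theorem minPlayerMoves_spec : Claim_equal_minPlayerMoves := by
  intro grid mw _ _
  unfold Spec_minPlayerMoves
  exact minPlayerMoves_eq_alt grid mw
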